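-- pv_equiv track=rewrite | github.com/SanjeevaRDodlapati/QeMLflow | tools/development/unified_optimizer.py | _generate_style_recommendations
-- ===== SOURCE A (Python) =====
-- from typing import Any, Dict, List, Optional, Tuple, Union
--
-- def _generate_style_recommendations(issues: List[str]) -> List[str]:
--     """Generate style improvement recommendations."""
--     recommendations = []
--
--     long_lines = [issue for issue in issues if "Line too long" in issue]
--     if long_lines:
--         recommendations.append(f"Fix {len(long_lines)} long lines")
--
--     missing_docs = [issue for issue in issues if "Missing docstring" in issue]
--     if missing_docs:
--         recommendations.append(
--             f"Add docstrings to {len(missing_docs)} functions/classes"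
--         )
--
--     todos = [issue for issue in issues if "TODO/FIXME" in issue]
--     if todos:
--         recommendations.append(f"Address {len(todos)} TODO/FIXME comments")
--
--     return recommendations
-- ===== SOURCE B (Python) =====
-- def _generate_style_recommendations(issues):
--     """Generate style improvement recommendations (single pass with counters)."""
--     long_lines = 0
--     missing_docs = 0
--     todos = 0
--     for issue in issues:
--         if "Line too long" in issue:
--             long_lines += 1
--         if "Missing docstring" in issue:
--             missing_docs += 1
--         if "TODO/FIXME" in issue:
--             todos += 1
--     recommendations = []
--     if long_lines:
--         recommendations.append(f"Fix {long_lines} long lines")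
--     if missing_docs:
--         recommendations.append(f"Add docstrings to {missing_docs} functions/classes")
--     if todos:
--         recommendations.append(f"Address {todos} TODO/FIXME comments")
--     return recommendations
-- ===== Notes on version B (the rewrite author's own statement) =====
-- stated objective: simpler
-- what changed: Replaces the three list comprehensions (each materialising a filtered list whose length is then taken) by one pass over issues maintaining three integer counters, emitting the same recommendation strings from the counts.
import Mathlib
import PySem

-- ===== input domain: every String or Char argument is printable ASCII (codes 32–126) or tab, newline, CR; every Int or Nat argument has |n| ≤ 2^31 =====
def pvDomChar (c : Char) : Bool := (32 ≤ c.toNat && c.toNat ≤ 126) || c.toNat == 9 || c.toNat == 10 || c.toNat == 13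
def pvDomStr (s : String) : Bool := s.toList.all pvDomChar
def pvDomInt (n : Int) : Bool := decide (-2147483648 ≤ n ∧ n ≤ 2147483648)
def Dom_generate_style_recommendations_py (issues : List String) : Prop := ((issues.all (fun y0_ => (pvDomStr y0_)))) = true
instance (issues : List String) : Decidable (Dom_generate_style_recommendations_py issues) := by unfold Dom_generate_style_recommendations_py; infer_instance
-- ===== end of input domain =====

-- B replaces A's three filtering comprehensions by a single pass over `issues` keeping three counters; same output, one traversal.


-- ===== PORT A =====
-- literal transliteration of A: three comprehensions (List.filter), each's length used in an f-string
def generate_style_recommendations_py (issues : List String) : List String :=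
  let recommendations : List String := []
  let long_lines := issues.filter (fun issue => PySem.Str.isIn "Line too long" issue)
  let recommendations :=
    if long_lines ≠ [] then
      recommendations ++ ["Fix " ++ PySem.Int.toStr (long_lines.length : Int) ++ " long lines"]
    else recommendations
  let missing_docs := issues.filter (fun issue => PySem.Str.isIn "Missing docstring" issue)
  let recommendations :=
    if missing_docs ≠ [] then
      recommendations ++ ["Add docstrings to " ++ PySem.Int.toStr (missing_docs.length : Int) ++ " functions/classes"]
    else recommendations
  let todos := issues.filter (fun issue => PySem.Str.isIn "TODO/FIXME" issue)
  let recommendations :=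
    if todos ≠ [] then
      recommendations ++ ["Address " ++ PySem.Int.toStr (todos.length : Int) ++ " TODO/FIXME comments"]
    else recommendations
  recommendations

-- ===== PORT B =====
-- literal transliteration of B: one fold maintaining three Int counters, then three guarded appends
def generate_style_recommendations_py_alt (issues : List String) : List String :=
  let c := issues.foldl
    (fun (c : Int × Int × Int) issue =>
      (if PySem.Str.isIn "Line too long" issue then c.1 + 1 else c.1,
       if PySem.Str.isIn "Missing docstring" issue then c.2.1 + 1 else c.2.1,
       if PySem.Str.isIn "TODO/FIXME" issue then c.2.2 + 1 else c.2.2))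
    (0, 0, 0)
  let recommendations : List String := []
  let recommendations :=
    if c.1 ≠ 0 then recommendations ++ ["Fix " ++ PySem.Int.toStr c.1 ++ " long lines"]
    else recommendations
  let recommendations :=
    if c.2.1 ≠ 0 then recommendations ++ ["Add docstrings to " ++ PySem.Int.toStr c.2.1 ++ " functions/classes"]
    else recommendations
  let recommendations :=
    if c.2.2 ≠ 0 then recommendations ++ ["Address " ++ PySem.Int.toStr c.2.2 ++ " TODO/FIXME comments"]
    else recommendations
  recommendations

-- ===== PRECONDITION & SPEC =====
def Spec_generate_style_recommendations_py (issues : List String) (out : List String) : Prop := out = generate_style_recommendations_py_alt issues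
instance (issues : List String) (out : List String) : Decidable (Spec_generate_style_recommendations_py issues out) := by unfold Spec_generate_style_recommendations_py; infer_instance

-- ===== CLAIM (what is proved, stated in full; the proofs are below) =====
def Claim_equal_generate_style_recommendations_py : Prop := ∀ (issues : List String), Dom_generate_style_recommendations_py issues → Spec_generate_style_recommendations_py issues (generate_style_recommendations_py issues)

-- ===== LEMMAS AND PROOFS =====

-- B's fold computes the three countP values of A's three filters
theorem pv_fold_counts (issues : List String) (a b c : Int) :
    issues.foldl
      (fun (c : Int × Int × Int) issue =>
        (if PySem.Str.isIn "Line too long" issue then c.1 + 1 else c.1,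
         if PySem.Str.isIn "Missing docstring" issue then c.2.1 + 1 else c.2.1,
         if PySem.Str.isIn "TODO/FIXME" issue then c.2.2 + 1 else c.2.2))
      (a, b, c)
    = (a + (issues.countP (fun issue => PySem.Str.isIn "Line too long" issue) : Int),
       b + (issues.countP (fun issue => PySem.Str.isIn "Missing docstring" issue) : Int),
       c + (issues.countP (fun issue => PySem.Str.isIn "TODO/FIXME" issue) : Int)) := by
  induction issues generalizing a b c with
  | nil => simp
  | cons x xs ih =>
      simp only [List.foldl_cons, List.countP_cons, ih]
      split_ifs <;> simp only [Prod.mk.injEq] <;> push_cast <;> omega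

-- ===== VERDICT (by name: the statement is the Claim_ definition above) =====
theorem generate_style_recommendations_py_spec : Claim_equal_generate_style_recommendations_py := by
  intro issues _
  unfold Spec_generate_style_recommendations_py
  unfold generate_style_recommendations_py generate_style_recommendations_py_alt
  simp only [pv_fold_counts, zero_add]
  have hlen : ∀ (p : String → Bool) (l : List String),
      ((l.filter p).length : Int) = (l.countP p : Int) := by
    intro p l; rw [List.countP_eq_length_filter]
  have hne : ∀ (p : String → Bool) (l : List String),
      (l.filter p ≠ [] ↔ (l.countP p : Int) ≠ 0) := by
    intro p l
    simp [List.filter_eq_nil_iff, List.countP_eq_zero]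
  simp only [hlen, hne]
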